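-- pv_equiv track=rewrite | github.com/Dardasaba/izkur | src/izkur/helpers/utils.py | intervals_to_str
-- ===== SOURCE A (Python) =====
-- import itertools
-- from typing import Tuple
-- from collections.abc import Iterable, Iterator
--
-- def intervals_extract(iterable: Iterable[int]) -> Iterator[Tuple[int, int]]:
--     iterable = sorted(set(iterable))
--     for key, group in itertools.groupby(enumerate(iterable), lambda t: t[1] - t[0]):
--         group = list(group)
--         yield (group[0][1], group[-1][1])
--
-- def intervals_to_str(intervals: list[int]) -> str:
--     obj_list: list[str] = []
--     for n, m in list(intervals_extract(intervals)):
--         if n == m: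
--             obj_list.append(f"{n}")
--         else:
--             obj_list.append(f"{n}–{m}")
--     return ", ".join(obj_list)
-- ===== SOURCE B (Python) =====
-- def intervals_to_str(intervals: list[int]) -> str:
--     nums = sorted(set(intervals))
--     if not nums:
--         return ""
--     parts: list[str] = []
--     start = prev = nums[0]
--     for v in nums[1:]:
--         if v != prev + 1:
--             parts.append(f"{start}" if start == prev else f"{start}\u2013{prev}")
--             start = v
--         prev = v
--     parts.append(f"{start}" if start == prev else f"{start}\u2013{prev}")
--     return ", ".join(parts)
-- ===== Notes on version B (the rewrite author's own statement) =====
-- stated objective: simpler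
-- what changed: Replaced the enumerate/index-difference-key itertools.groupby generator plus helper function with one inline scan maintaining start/prev that emits a range whenever the successor chain breaks.
import Mathlib
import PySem

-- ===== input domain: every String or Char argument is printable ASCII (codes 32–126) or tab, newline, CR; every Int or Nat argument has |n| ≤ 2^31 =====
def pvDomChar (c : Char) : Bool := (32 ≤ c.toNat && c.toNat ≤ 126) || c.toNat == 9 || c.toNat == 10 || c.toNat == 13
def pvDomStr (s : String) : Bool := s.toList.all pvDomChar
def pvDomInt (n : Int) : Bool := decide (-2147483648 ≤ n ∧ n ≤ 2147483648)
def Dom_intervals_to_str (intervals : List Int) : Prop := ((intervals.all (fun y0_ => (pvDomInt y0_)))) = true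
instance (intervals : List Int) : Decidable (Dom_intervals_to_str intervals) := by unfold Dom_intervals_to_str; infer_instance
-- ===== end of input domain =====

-- B replaces the groupby-over-enumerate helper decomposition with one inline break-detecting scan (objective: simpler).

-- ===== PORT A =====
-- enumerate(iterable) with an Int index (Python yields int indices; exact)
def pvEnum (i : Int) : List Int → List (Int × Int)
  | [] => []
  | x :: xs => (i, x) :: pvEnum (i + 1) xs

-- itertools.groupby(xs, key = fun t => t.2 - t.1), each group materialised as a list (exact for this key)
def pvGroupby : List (Int × Int) → List (List (Int × Int))
  | [] => []
  | x :: xs =>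
    (x :: xs.takeWhile (fun y => y.2 - y.1 == x.2 - x.1)) ::
      pvGroupby (xs.dropWhile (fun y => y.2 - y.1 == x.2 - x.1))
termination_by xs => xs.length
decreasing_by
  exact Nat.lt_succ_of_le (List.length_dropWhile_le _ _)

def intervals_extract (iterable : List Int) : List (Int × Int) :=
  let nums := PySem.List.sorted (PySem.Set.ofList iterable) (fun x => x)
  (pvGroupby (pvEnum 0 nums)).map (fun g => ((g.headD (0, 0)).2, (g.getLastD (0, 0)).2))

def intervals_to_str (intervals : List Int) : String :=
  let objList : List (List Char) := (intervals_extract intervals).foldl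
    (fun acc p =>
      if p.1 = p.2 then acc ++ [PySem.Int.toChars p.1]
      else acc ++ [PySem.Int.toChars p.1 ++ '–' :: PySem.Int.toChars p.2]) []
  String.ofList (PySem.Chars.join ", ".toList objList)

-- ===== PORT B =====
def pvFmt (start prev : Int) : List Char :=
  if start = prev then PySem.Int.toChars start
  else PySem.Int.toChars start ++ '–' :: PySem.Int.toChars prev

def pvScan (start prev : Int) : List Int → List (List Char)
  | [] => [pvFmt start prev]
  | v :: rest =>
    if v ≠ prev + 1 then pvFmt start prev :: pvScan v v rest
    else pvScan start v rest

def intervals_to_str_alt (intervals : List Int) : String :=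
  match PySem.List.sorted (PySem.Set.ofList intervals) (fun x => x) with
  | [] => ""
  | x :: rest => String.ofList (PySem.Chars.join ", ".toList (pvScan x x rest))

-- ===== PRECONDITION & SPEC =====
def Spec_intervals_to_str (intervals : List Int) (out : String) : Prop := out = intervals_to_str_alt intervals
instance (intervals : List Int) (out : String) : Decidable (Spec_intervals_to_str intervals out) := by unfold Spec_intervals_to_str; infer_instance

-- ===== CLAIM (what is proved, stated in full; the proofs are below) =====
def Claim_equal_intervals_to_str : Prop := ∀ (intervals : List Int), Dom_intervals_to_str intervals → Spec_intervals_to_str intervals (intervals_to_str intervals)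

-- ===== LEMMAS AND PROOFS =====
def pvPartsA (xs : List (Int × Int)) : List (List Char) :=
  (pvGroupby xs).map (fun g => pvFmt (g.headD (0, 0)).2 (g.getLastD (0, 0)).2)

lemma pvScan_eq : ∀ (rest : List Int) (i start prev : Int),
    pvFmt start (((pvEnum (i + 1) rest).takeWhile (fun y => y.2 - y.1 == prev - i)).getLastD (i, prev)).2
      :: pvPartsA ((pvEnum (i + 1) rest).dropWhile (fun y => y.2 - y.1 == prev - i))
    = pvScan start prev rest := by
  intro rest
  induction rest with
  | nil =>
    intro i start prev
    simp only [pvEnum, List.takeWhile_nil, List.dropWhile_nil, List.getLastD_nil,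
      pvPartsA, pvGroupby, List.map_nil, pvScan]
  | cons w rest ih =>
    intro i start prev
    simp only [pvEnum, List.takeWhile_cons, List.dropWhile_cons]
    by_cases h : w = prev + 1
    · have hc : ((i + 1, w).2 - (i + 1, w).1 == prev - i) = true := by
        simp only [beq_iff_eq]; omega
      rw [hc]
      simp only [if_true, List.getLastD_cons]
      have hk : w - (i + 1) = prev - i := by omega
      have := ih (i + 1) start w
      rw [hk] at this
      rw [this]
      simp [pvScan, h]
    · have hc : ((i + 1, w).2 - (i + 1, w).1 == prev - i) = false := by
        simp only [beq_eq_false_iff_ne, ne_eq]; omega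
      rw [hc]
      simp only [Bool.false_eq_true, if_false, List.getLastD_nil]
      have hB : pvPartsA ((i + 1, w) :: pvEnum (i + 1 + 1) rest) = pvScan w w rest := by
        show (pvGroupby ((i + 1, w) :: pvEnum (i + 1 + 1) rest)).map _ = _
        rw [pvGroupby]
        simp only [List.map_cons, List.headD_cons, List.getLastD_cons]
        exact ih (i + 1) w w
      rw [hB]
      simp [pvScan, h]

lemma pvPartsA_enum_cons (v : Int) (rest : List Int) (i : Int) :
    pvPartsA (pvEnum i (v :: rest)) = pvScan v v rest := by
  show (pvGroupby (pvEnum i (v :: rest))).map _ = _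
  rw [pvEnum, pvGroupby]
  simp only [List.map_cons, List.headD_cons, List.getLastD_cons]
  exact pvScan_eq rest i v v

lemma foldl_fmt (l : List (Int × Int)) :
    l.foldl (fun acc p =>
      if p.1 = p.2 then acc ++ [PySem.Int.toChars p.1]
      else acc ++ [PySem.Int.toChars p.1 ++ '–' :: PySem.Int.toChars p.2]) []
    = l.map (fun p => pvFmt p.1 p.2) := by
  have h1 := PySem.List.foldl_congr_mem
    (l := l) (init := ([] : List (List Char)))
    (f := fun acc p =>
      if p.1 = p.2 then acc ++ [PySem.Int.toChars p.1]
      else acc ++ [PySem.Int.toChars p.1 ++ '–' :: PySem.Int.toChars p.2])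
    (g := fun acc p => acc ++ [pvFmt p.1 p.2])
    (by intro acc p _; by_cases hp : p.1 = p.2 <;> simp [pvFmt, hp])
  rw [h1, PySem.List.foldl_append_singleton_eq_map]
  simp

theorem main_eq (intervals : List Int) : intervals_to_str intervals = intervals_to_str_alt intervals := by
  unfold intervals_to_str intervals_to_str_alt intervals_extract
  cases hn : PySem.List.sorted (PySem.Set.ofList intervals) (fun x => x) with
  | nil => simp [pvEnum, pvGroupby, PySem.Chars.join, List.intercalate]
  | cons x rest =>
    simp only [foldl_fmt, List.map_map]
    have : (pvEnum 0 (x :: rest) |> pvGroupby |>.map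
        ((fun p => pvFmt p.1 p.2) ∘ fun g => ((g.headD (0, 0)).2, (g.getLastD (0, 0)).2)))
        = pvPartsA (pvEnum 0 (x :: rest)) := rfl
    rw [this, pvPartsA_enum_cons]

-- ===== VERDICT (by name: the statement is the Claim_ definition above) =====
theorem intervals_to_str_spec : Claim_equal_intervals_to_str := by
  intro intervals _
  exact main_eq intervals
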